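-- pv_equiv track=rewrite | github.com/Lvprtsharma/python_practice | strings/shortest_word.py | shortest_word_manual
-- ===== SOURCE A (Python) =====
-- def shortest_word_manual(s):
--     """
--     Method 3: Manual loop
--     """
--     min_word = ''
--     min_len = float('inf')
--     word = ''
--     for c in s + ' ':
--         if c.isalnum():
--             word += c
--         elif word:
--             if len(word) < min_len:
--                 min_len = len(word)
--                 min_word = word
--             word = ''
--     return min_word
-- ===== SOURCE B (Python) =====
-- def shortest_word_manual(s):
--     """
--     Method 3: normalize separators to spaces, split, then take min by length
--     """
--     words = ''.join(c if c.isalnum() else ' ' for c in s).split()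
--     return min(words, key=len) if words else ''
-- ===== Notes on version B (the rewrite author's own statement) =====
-- stated objective: simpler
-- what changed: Replaces A's single interleaved scan with running-min state by a two-pass decomposition: normalize non-alphanumeric characters to spaces, tokenize with str.split(), then reduce with min(words, key=len).
import Mathlib
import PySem

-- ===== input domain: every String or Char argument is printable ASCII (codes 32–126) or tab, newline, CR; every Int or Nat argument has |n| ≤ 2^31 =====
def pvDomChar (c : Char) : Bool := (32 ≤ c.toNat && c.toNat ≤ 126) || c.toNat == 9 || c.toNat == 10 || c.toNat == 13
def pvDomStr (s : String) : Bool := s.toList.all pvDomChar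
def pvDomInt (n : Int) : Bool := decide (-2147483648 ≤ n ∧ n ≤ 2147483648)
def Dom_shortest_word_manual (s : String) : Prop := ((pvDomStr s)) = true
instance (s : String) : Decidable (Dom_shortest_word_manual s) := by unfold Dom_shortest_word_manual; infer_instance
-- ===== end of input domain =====

-- B tokenizes first (map non-alnum chars to spaces, split) and then reduces with min(key=len):
-- a two-pass decomposition instead of A's interleaved single-pass loop; same cost, simpler.

-- ===== PORT A =====
-- min_len = float('inf') is modelled as `none` (the comparison `len(word) < min_len`
-- is `pyInfLt`, true against infinity, `n < m` against a recorded finite length).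
def pyInfLt (n : Nat) (ml : Option Nat) : Bool :=
  match ml with
  | none => true
  | some m => n < m

def swmStep (st : List Char × Option Nat × List Char) (c : Char) :
    List Char × Option Nat × List Char :=
  let mw := st.1; let ml := st.2.1; let w := st.2.2
  if PySem.Chars.isalnum c then (mw, ml, w ++ [c])
  else if w ≠ [] then
    if pyInfLt w.length ml then (w, some w.length, [])
    else (mw, ml, [])
  else (mw, ml, w)

def shortest_word_manual (s : String) : String :=
  (String.ofList ((s.toList ++ [' ']).foldl swmStep ([], none, [])).1)

-- ===== PORT B =====
def shortest_word_manual_alt (s : String) : String :=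
  match PySem.List.min?
      (PySem.Chars.split₀ (s.toList.map (fun c => if PySem.Chars.isalnum c then c else ' ')))
      (fun w => w.length) with
  | some w => String.ofList w
  | none => ""

-- ===== PRECONDITION & SPEC =====
def Spec_shortest_word_manual (s : String) (out : String) : Prop := out = shortest_word_manual_alt s
instance (s : String) (out : String) : Decidable (Spec_shortest_word_manual s out) := by unfold Spec_shortest_word_manual; infer_instance

-- ===== CLAIM (what is proved, stated in full; the proofs are below) =====
def Claim_equal_shortest_word_manual : Prop := ∀ (s : String), Dom_shortest_word_manual s → Spec_shortest_word_manual s (shortest_word_manual s)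

-- ===== LEMMAS AND PROOFS =====

-- the maximal alphanumeric runs of a character list, in order
def swmTokens : List Char → List (List Char)
  | [] => []
  | c :: cs =>
    if PySem.Chars.isalnum c then
      (c :: cs.takeWhile PySem.Chars.isalnum) :: swmTokens (cs.dropWhile PySem.Chars.isalnum)
    else swmTokens cs
termination_by cs => cs.length
decreasing_by
  · exact Nat.lt_succ_of_le (List.length_dropWhile_le _ _)
  · simp

-- the step of Python's min(words, key=len)
def swmMin (acc : Option (List Char)) (x : List Char) : Option (List Char) :=
  match acc with
  | none => some x
  | some m => if x.length < m.length then some x else some m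

lemma isalnum_not_isspace (c : Char) (h : PySem.Chars.isalnum c = true) :
    PySem.Chars.isspace c = false := by
  simp [PySem.Chars.isalnum, PySem.Chars.isalpha, PySem.Chars.isdigit,
    PySem.Chars.isupper, PySem.Chars.islower, PySem.Chars.isspace,
    Char.le_def, UInt32.le_iff_toNat_le] at *
  omega

lemma takeWhile_append_all {p : Char → Bool} {w : List Char} (hw : ∀ a ∈ w, p a = true)
    (rest : List Char) : (w ++ rest).takeWhile p = w ++ rest.takeWhile p := by
  induction w with
  | nil => simp
  | cons a w ih =>
    simp only [List.cons_append, List.takeWhile_cons, hw a (by simp)]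
    simp [ih (fun b hb => hw b (by simp [hb]))]

lemma dropWhile_append_all {p : Char → Bool} {w : List Char} (hw : ∀ a ∈ w, p a = true)
    (rest : List Char) : (w ++ rest).dropWhile p = rest.dropWhile p := by
  induction w with
  | nil => simp
  | cons a w ih =>
    simp only [List.cons_append, List.dropWhile_cons, hw a (by simp)]
    simp [ih (fun b hb => hw b (by simp [hb]))]

lemma swmTokens_alnum_prefix {w : List Char} (hw : ∀ a ∈ w, PySem.Chars.isalnum a = true)
    (hne : w ≠ []) (rest : List Char) :
    swmTokens (w ++ rest) =
      (w ++ rest.takeWhile PySem.Chars.isalnum) ::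
        swmTokens (rest.dropWhile PySem.Chars.isalnum) := by
  cases w with
  | nil => exact absurd rfl hne
  | cons a w =>
    have ha : PySem.Chars.isalnum a = true := hw a (by simp)
    have hw' : ∀ b ∈ w, PySem.Chars.isalnum b = true := fun b hb => hw b (by simp [hb])
    simp only [List.cons_append, swmTokens, ha, if_pos]
    rw [takeWhile_append_all hw', dropWhile_append_all hw']

lemma swmTokens_word {w : List Char} (hw : ∀ a ∈ w, PySem.Chars.isalnum a = true)
    (hne : w ≠ []) : swmTokens w = [w] := by
  have h := swmTokens_alnum_prefix hw hne []
  rw [List.append_nil] at h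
  simp [h, swmTokens]

lemma swmTokens_word_cons {w : List Char} (hw : ∀ a ∈ w, PySem.Chars.isalnum a = true)
    (hne : w ≠ []) {c : Char} (hc : PySem.Chars.isalnum c = false) (rest : List Char) :
    swmTokens (w ++ c :: rest) = w :: swmTokens rest := by
  rw [swmTokens_alnum_prefix hw hne]
  simp [hc, swmTokens]

-- A's loop over cs ++ [' '], started with pending word w (all alphanumeric) and best-so-far
-- acc, computes the min-by-length fold over the tokens of w ++ cs continued from acc.
lemma swm_main (cs : List Char) : ∀ (w : List Char) (acc : Option (List Char)),
    (∀ a ∈ w, PySem.Chars.isalnum a = true) →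
    ((cs ++ [' ']).foldl swmStep (acc.getD [], acc.map List.length, w)).1
      = ((swmTokens (w ++ cs)).foldl swmMin acc).getD [] := by
  induction cs with
  | nil =>
    intro w acc hw
    have hsp : PySem.Chars.isalnum ' ' = false := by decide
    by_cases hne : w = []
    · subst hne
      cases acc <;> simp [swmStep, hsp, swmTokens]
    · rw [List.append_nil, swmTokens_word hw hne]
      cases acc with
      | none => simp [swmStep, hsp, hne, pyInfLt, swmMin]
      | some m =>
        by_cases hlt : w.length < m.length <;>
          simp [swmStep, hsp, hne, pyInfLt, swmMin, hlt]
  | cons c cs ih =>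
    intro w acc hw
    by_cases hc : PySem.Chars.isalnum c = true
    · have : (c :: cs ++ [' ']).foldl swmStep (acc.getD [], acc.map List.length, w)
          = (cs ++ [' ']).foldl swmStep (acc.getD [], acc.map List.length, w ++ [c]) := by
        simp [swmStep, hc]
      rw [List.cons_append] at this ⊢
      rw [this, ih (w ++ [c]) acc (by
        intro a ha
        rcases List.mem_append.mp ha with h | h
        · exact hw a h
        · simp at h; subst h; exact hc), List.append_assoc]
      simp
    · have hc' : PySem.Chars.isalnum c = false := by simpa using hc
      by_cases hne : w = []
      · subst hne
        have : (c :: cs ++ [' ']).foldl swmStep (acc.getD [], acc.map List.length, [])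
            = (cs ++ [' ']).foldl swmStep (acc.getD [], acc.map List.length, []) := by
          simp [swmStep, hc']
        rw [List.cons_append] at this ⊢
        rw [this, ih [] acc (by simp)]
        simp [swmTokens, hc']
      · have hstep : swmStep (acc.getD [], acc.map List.length, w) c
            = ((swmMin acc w).getD [], (swmMin acc w).map List.length, []) := by
          cases acc with
          | none => simp [swmStep, hc', hne, pyInfLt, swmMin]
          | some m =>
            by_cases hlt : w.length < m.length <;>
              simp [swmStep, hc', hne, pyInfLt, swmMin, hlt]
        rw [List.cons_append, List.foldl_cons, hstep,
          ih [] (swmMin acc w) (by simp), swmTokens_word_cons hw hne hc']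
        simp

-- split() of the space-normalized list produces exactly the alphanumeric tokens
lemma split₀_go_spec (cs : List Char) : ∀ (w : List Char) (acc : List (List Char)),
    (∀ a ∈ w, PySem.Chars.isalnum a = true) →
    PySem.Chars.split₀.go
      (cs.map (fun c => if PySem.Chars.isalnum c then c else ' ')) w.reverse acc
      = acc.reverse ++ swmTokens (w ++ cs) := by
  induction cs with
  | nil =>
    intro w acc hw
    by_cases hne : w = []
    · subst hne; simp [PySem.Chars.split₀.go, swmTokens]
    · rw [List.append_nil, swmTokens_word hw hne]
      simp [PySem.Chars.split₀.go, List.isEmpty_iff, hne]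
  | cons c cs ih =>
    intro w acc hw
    by_cases hc : PySem.Chars.isalnum c = true
    · have hsp := isalnum_not_isspace c hc
      simp only [List.map_cons, hc, if_pos, PySem.Chars.split₀.go, hsp,
        Bool.false_eq_true, if_false]
      have : c :: w.reverse = (w ++ [c]).reverse := by simp
      rw [this, ih (w ++ [c]) acc (by
        intro a ha
        rcases List.mem_append.mp ha with h | h
        · exact hw a h
        · simp at h; subst h; exact hc), List.append_assoc]
      simp
    · have hc' : PySem.Chars.isalnum c = false := by simpa using hc
      have hsp : PySem.Chars.isspace ' ' = true := by decide
      by_cases hne : w = []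
      · subst hne
        simp only [List.map_cons, hc', Bool.false_eq_true, if_false,
          PySem.Chars.split₀.go, hsp, if_pos, List.reverse_nil, List.isEmpty_nil]
        rw [show ([] : List Char) = ([] : List Char).reverse from rfl,
          ih [] acc (by simp)]
        simp [swmTokens, hc']
      · simp only [List.map_cons, hc', Bool.false_eq_true, if_false,
          PySem.Chars.split₀.go, hsp, if_pos, List.isEmpty_iff, List.reverse_eq_nil_iff,
          hne, if_false, List.reverse_reverse]
        rw [show ([] : List Char) = ([] : List Char).reverse from rfl,
          ih [] (w :: acc) (by simp), swmTokens_word_cons hw hne hc']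
        simp

lemma min?_eq_foldl (ws : List (List Char)) :
    PySem.List.min? ws (fun w => w.length) = ws.foldl swmMin none := by
  unfold PySem.List.min? swmMin
  congr 1
  funext acc x
  cases acc <;> rfl

-- ===== VERDICT (by name: the statement is the Claim_ definition above) =====
theorem shortest_word_manual_spec : Claim_equal_shortest_word_manual := by
  intro s _
  unfold Spec_shortest_word_manual shortest_word_manual shortest_word_manual_alt
  rw [show (PySem.Chars.split₀
        (s.toList.map (fun c => if PySem.Chars.isalnum c then c else ' ')))
      = swmTokens s.toList from by
    simpa using split₀_go_spec s.toList [] [] (by simp)]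
  rw [min?_eq_foldl]
  have := swm_main s.toList [] none (by simp)
  simp only [Option.getD_none, Option.map_none] at this
  rw [show ([] : List Char) ++ s.toList = s.toList from rfl] at this
  rw [this]
  cases h : (swmTokens s.toList).foldl swmMin none <;> simp
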